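-- pv_equiv track=rewrite | github.com/mikemol/cstz | src/cstz/pff.py | _kernel_projection
-- ===== SOURCE A (Python) =====
-- from typing import (
--     Any,
--     Callable,
--     Dict,
--     FrozenSet,
--     Iterable,
--     Iterator,
--     List,
--     Mapping,
--     Optional,
--     Tuple,
--     Union,
-- )
--
-- def _kernel_projection(
--     elements: Iterable[str],
--     edges: Iterable[Tuple[str, str]],
-- ) -> Dict[str, str]:
--     """Compute the kernel projection of an F₂ boundary map.
--
--     Given a finite set of vertex ids and a list of edges, returns a
--     map from each vertex to the lex-smallest member of its connected
--     component.  This is the kernel of the boundary map ∂ : F₂^E →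
--     F₂^V projected onto representatives, computed by union-find with
--     path compression.
--
--     Lex-smallest is chosen as the canonical representative for
--     deterministic, choice-independent output across runs.
--     """
--     parent: Dict[str, str] = {e: e for e in elements}
--
--     def find(x: str) -> str:
--         r = x
--         while parent[r] != r:
--             r = parent[r]
--         while parent[x] != r:
--             parent[x], x = r, parent[x]
--         return r
--
--     def union(a: str, b: str) -> None:
--         ra, rb = find(a), find(b)
--         if ra == rb:
--             return
--         if ra < rb:
--             parent[rb] = ra
--         else:
--             parent[ra] = rb
--
--     for a, b in edges:
--         union(a, b)
--
--     return {x: find(x) for x in parent}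
-- ===== SOURCE B (Python) =====
-- def _kernel_projection(elements, edges):
--     """Flat-label version: keep a direct vertex->representative map and, on each
--     merging edge, relabel the component with the larger representative."""
--     rep = {e: e for e in elements}
--     for a, b in edges:
--         ra, rb = rep[a], rep[b]
--         if ra != rb:
--             lo, hi = (ra, rb) if ra < rb else (rb, ra)
--             rep = {v: (lo if r == hi else r) for v, r in rep.items()}
--     return rep
-- ===== Notes on version B (the rewrite author's own statement) =====
-- stated objective: alternative
-- what changed: Replaces A's union-find (parent forest with path compression and per-vertex find) by a flat vertex-to-representative map that, on each component-merging edge, relabels every vertex of the larger-named component to the smaller representative.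
import Mathlib
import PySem

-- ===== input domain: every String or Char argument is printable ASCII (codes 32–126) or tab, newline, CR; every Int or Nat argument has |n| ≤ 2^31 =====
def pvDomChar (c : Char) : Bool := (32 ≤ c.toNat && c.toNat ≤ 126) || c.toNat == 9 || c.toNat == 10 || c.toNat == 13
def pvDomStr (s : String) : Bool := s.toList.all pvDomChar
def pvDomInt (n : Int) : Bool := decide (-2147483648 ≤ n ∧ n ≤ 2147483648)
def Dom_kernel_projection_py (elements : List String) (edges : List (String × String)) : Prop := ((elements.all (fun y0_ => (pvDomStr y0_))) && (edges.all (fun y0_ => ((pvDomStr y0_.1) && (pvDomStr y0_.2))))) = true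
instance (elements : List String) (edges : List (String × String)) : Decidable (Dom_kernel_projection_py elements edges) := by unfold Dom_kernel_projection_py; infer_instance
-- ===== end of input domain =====

-- B replaces A's union-find (parent forest + path compression) by a flat vertex→representative
-- map that relabels the larger-named component on each merging edge (alternative algorithm, not faster).

-- ===== PORT A =====
-- while parent[r] != r: r = parent[r]   (fuel is a totality guard only; parent[r] is a plain
-- dict lookup — Python's KeyError cases are excluded by Pre_, so getD never hits its default there)
def pvFindRoot : Nat → PySem.Dict String String → String → String
  | 0, _, r => r
  | f+1, p, r => if p.getD r r ≠ r then pvFindRoot f p (p.getD r r) else r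

-- while parent[x] != r: parent[x], x = r, parent[x]
def pvCompress : Nat → PySem.Dict String String → String → String → PySem.Dict String String
  | 0, p, _, _ => p
  | f+1, p, x, r => if p.getD x x ≠ r then pvCompress f (p.insert x r) (p.getD x x) r else p

def pvFind (F : Nat) (p : PySem.Dict String String) (x : String) :
    PySem.Dict String String × String :=
  let r := pvFindRoot F p x
  (pvCompress F p x r, r)

def pvUnion (F : Nat) (p : PySem.Dict String String) (a b : String) : PySem.Dict String String :=
  let fa := pvFind F p a
  let fb := pvFind F fa.1 b
  if fa.2 = fb.2 then fb.1
  else if fa.2 < fb.2 then fb.1.insert fb.2 fa.2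
  else fb.1.insert fa.2 fb.2

def kernel_projection_py (elements : List String) (edges : List (String × String)) :
    List (String × String) :=
  let F := elements.length + 1   -- fuel: strictly more than any parent-chain length
  let p0 := elements.foldl (fun d e => d.insert e e) PySem.Dict.empty   -- {e: e for e in elements}
  let p1 := edges.foldl (fun p ab => pvUnion F p ab.1 ab.2) p0          -- for a, b in edges: union(a, b)
  -- return {x: find(x) for x in parent}  (keys are distinct, so the dict is the list of pairs)
  (p1.keys.foldl (fun st x =>
      let fr := pvFind F st.1 x
      (fr.1, st.2 ++ [(x, fr.2)])) (p1, ([] : List (String × String)))).2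

-- ===== PORT B =====
-- rep = {v: (lo if r == hi else r) for v, r in rep.items()}
def pvRelabel (hi lo : String) (d : PySem.Dict String String) : PySem.Dict String String :=
  PySem.Dict.mk (d.items.map (fun kv => (kv.1, if kv.2 = hi then lo else kv.2)))

-- one edge: ra, rb = rep[a], rep[b]; if ra != rb: relabel hi → lo
-- (rep[a] is a plain dict lookup — the KeyError cases are excluded by Pre_, getD never hits its default there)
def pvStepB (d : PySem.Dict String String) (ab : String × String) : PySem.Dict String String :=
  let ra := d.getD ab.1 ab.1
  let rb := d.getD ab.2 ab.2
  if ra ≠ rb then pvRelabel (if ra < rb then rb else ra) (if ra < rb then ra else rb) d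
  else d

def kernel_projection_py_alt (elements : List String) (edges : List (String × String)) :
    List (String × String) :=
  (edges.foldl pvStepB
    (elements.foldl (fun d e => d.insert e e) PySem.Dict.empty)).items

-- ===== PRECONDITION & SPEC =====
-- Pre_ excludes exactly the inputs on which A raises KeyError: an edge endpoint absent from elements.
def Pre_kernel_projection_py (elements : List String) (edges : List (String × String)) : Prop :=
  ∀ ab ∈ edges, ab.1 ∈ elements ∧ ab.2 ∈ elements
instance (elements : List String) (edges : List (String × String)) :
    Decidable (Pre_kernel_projection_py elements edges) := by
  unfold Pre_kernel_projection_py; infer_instance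

def pvWitness_kernel_projection_py : List String × (List (String × String)) :=
  (["b", "a", "c"], [("b", "c")])

def Spec_kernel_projection_py (elements : List String) (edges : List (String × String))
    (out : List (String × String)) : Prop := out = kernel_projection_py_alt elements edges
instance (elements : List String) (edges : List (String × String)) (out : List (String × String)) :
    Decidable (Spec_kernel_projection_py elements edges out) := by
  unfold Spec_kernel_projection_py; infer_instance

-- ===== CLAIM (what is proved, stated in full; the proofs are below) =====
def Claim_equal_kernel_projection_py : Prop :=
  ∀ (elements : List String) (edges : List (String × String)),
    Dom_kernel_projection_py elements edges → Pre_kernel_projection_py elements edges →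
    Spec_kernel_projection_py elements edges (kernel_projection_py elements edges)

-- ===== LEMMAS AND PROOFS =====

-- measure: number of keys strictly below x (parent chains strictly decrease, so this bounds them)
def pvM (ks : List String) (x : String) : Nat := ks.countP (fun y => decide (y < x))

-- invariant of A's parent dict: keys distinct, every value a key and ≤ its key
def pvWf (p : PySem.Dict String String) : Prop :=
  p.keys.Nodup ∧ ∀ x ∈ p.keys, p.getD x x ∈ p.keys ∧ p.getD x x ≤ x

-- the root of x in the parent forest (fuel large enough; proved fuel-independent below)
def pvRoot (p : PySem.Dict String String) (x : String) : String :=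
  pvFindRoot (p.keys.length + 1) p x

-- relation between A's state p and B's state d after the same edge prefix
def pvInv (elements : List String) (p d : PySem.Dict String String) : Prop :=
  p.keys = PySem.Set.ofList elements ∧ d.keys = p.keys ∧ pvWf p ∧
    ∀ x ∈ p.keys, d.getD x x = pvRoot p x

theorem pvM_le (ks : List String) (x : String) : pvM ks x ≤ ks.length :=
  List.countP_le_length

theorem pvM_lt_pvM {ks : List String} {a b : String} (ha : a ∈ ks) (hab : a < b) :
    pvM ks a < pvM ks b := by
  induction ks with
  | nil => cases ha
  | cons h t ih =>
    simp only [pvM, List.countP_cons] at *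
    rcases List.mem_cons.mp ha with rfl | hat
    · have h1 : decide (a < a) = false := by simp
      have h2 : decide (a < b) = true := by simp [hab]
      have hmono : t.countP (fun y => decide (y < a)) ≤ t.countP (fun y => decide (y < b)) := by
        apply List.countP_mono_left
        intro y _ hy
        simp only [decide_eq_true_eq] at *
        exact lt_trans hy hab
      rw [h1, h2]
      simp only [Bool.false_eq_true, if_false, if_true]
      omega
    · have := ih hat
      have hmono : (if decide (h < a) = true then 1 else 0) ≤ (if decide (h < b) = true then 1 else 0) := by
        by_cases hh : h < a
        · simp [hh, lt_trans hh hab]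
        · simp [hh]
      split_ifs at hmono ⊢ <;> omega

theorem pvFindRoot_succ (f : Nat) (p : PySem.Dict String String) (r : String) :
    pvFindRoot (f+1) p r = if p.getD r r ≠ r then pvFindRoot f p (p.getD r r) else r := rfl

theorem pvCompress_succ (f : Nat) (p : PySem.Dict String String) (x r : String) :
    pvCompress (f+1) p x r =
      if p.getD x x ≠ r then pvCompress f (p.insert x r) (p.getD x x) r else p := rfl

theorem pvFindRoot_spec (p : PySem.Dict String String) (hw : pvWf p) :
    ∀ f, ∀ x ∈ p.keys, pvM p.keys x < f →
      pvFindRoot f p x ∈ p.keys ∧ pvFindRoot f p x ≤ x ∧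
        p.getD (pvFindRoot f p x) (pvFindRoot f p x) = pvFindRoot f p x := by
  intro f
  induction f with
  | zero => intro x _ hm; omega
  | succ f ih =>
    intro x hx hm
    rw [pvFindRoot_succ]
    by_cases h : p.getD x x = x
    · simp only [h, ne_eq, not_true_eq_false, if_false]
      exact ⟨hx, le_refl x, trivial⟩
    · simp only [ne_eq, h, not_false_eq_true, if_true]
      obtain ⟨hy, hyx⟩ := hw.2 x hx
      have hylt : p.getD x x < x := lt_of_le_of_ne hyx h
      have hmy : pvM p.keys (p.getD x x) < f := by
        have := pvM_lt_pvM hy hylt; omega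
      obtain ⟨h1, h2, h3⟩ := ih (p.getD x x) hy hmy
      exact ⟨h1, le_trans h2 (le_of_lt hylt), h3⟩

theorem pvFindRoot_fuel (p : PySem.Dict String String) (hw : pvWf p) :
    ∀ f g, ∀ x ∈ p.keys, pvM p.keys x < f → pvM p.keys x < g →
      pvFindRoot f p x = pvFindRoot g p x := by
  intro f
  induction f with
  | zero => intro g x _ hm; omega
  | succ f ih =>
    intro g x hx hmf hmg
    obtain ⟨g', rfl⟩ : ∃ g', g = g' + 1 := ⟨g - 1, by omega⟩
    rw [pvFindRoot_succ, pvFindRoot_succ]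
    by_cases h : p.getD x x = x
    · simp [h]
    · simp only [ne_eq, h, not_false_eq_true, if_true]
      obtain ⟨hy, hyx⟩ := hw.2 x hx
      have hylt : p.getD x x < x := lt_of_le_of_ne hyx h
      have hmy := pvM_lt_pvM hy hylt
      exact ih g' (p.getD x x) hy (by omega) (by omega)

theorem pvRoot_eq_findRoot (p : PySem.Dict String String) (hw : pvWf p) {f : Nat} {x : String}
    (hx : x ∈ p.keys) (hm : pvM p.keys x < f) : pvFindRoot f p x = pvRoot p x :=
  pvFindRoot_fuel p hw f (p.keys.length + 1) x hx hm (by have := pvM_le p.keys x; omega)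

theorem pvRoot_mem (p : PySem.Dict String String) (hw : pvWf p) {x : String} (hx : x ∈ p.keys) :
    pvRoot p x ∈ p.keys :=
  (pvFindRoot_spec p hw (p.keys.length + 1) x hx (by have := pvM_le p.keys x; omega)).1

theorem pvRoot_le (p : PySem.Dict String String) (hw : pvWf p) {x : String} (hx : x ∈ p.keys) :
    pvRoot p x ≤ x :=
  (pvFindRoot_spec p hw (p.keys.length + 1) x hx (by have := pvM_le p.keys x; omega)).2.1

theorem pvRoot_fixed (p : PySem.Dict String String) (hw : pvWf p) {x : String} (hx : x ∈ p.keys) :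
    p.getD (pvRoot p x) (pvRoot p x) = pvRoot p x :=
  (pvFindRoot_spec p hw (p.keys.length + 1) x hx (by have := pvM_le p.keys x; omega)).2.2

theorem pvRoot_unfold (p : PySem.Dict String String) (hw : pvWf p) {x : String} (hx : x ∈ p.keys) :
    pvRoot p x = if p.getD x x = x then x else pvRoot p (p.getD x x) := by
  by_cases h : p.getD x x = x
  · rw [if_pos h]
    show pvFindRoot (p.keys.length + 1) p x = x
    rw [pvFindRoot_succ]
    simp [h]
  · rw [if_neg h]
    show pvFindRoot (p.keys.length + 1) p x = _
    rw [pvFindRoot_succ]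
    simp only [ne_eq, h, not_false_eq_true, if_true]
    obtain ⟨hy, hyx⟩ := hw.2 x hx
    have hylt : p.getD x x < x := lt_of_le_of_ne hyx h
    have hmy := pvM_lt_pvM hy hylt
    have hmx := pvM_le p.keys x
    exact pvRoot_eq_findRoot p hw hy (by omega)

theorem pvRoot_eq_self (p : PySem.Dict String String) (hw : pvWf p) {x : String}
    (hx : x ∈ p.keys) (h : p.getD x x = x) : pvRoot p x = x := by
  rw [pvRoot_unfold p hw hx, if_pos h]

theorem pvRoot_step (p : PySem.Dict String String) (hw : pvWf p) {x : String} (hx : x ∈ p.keys) :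
    pvRoot p (p.getD x x) = pvRoot p x := by
  by_cases h : p.getD x x = x
  · rw [h]
  · rw [pvRoot_unfold p hw hx, if_neg h]

theorem pvRoot_root (p : PySem.Dict String String) (hw : pvWf p) {x : String} (hx : x ∈ p.keys) :
    pvRoot p (pvRoot p x) = pvRoot p x :=
  pvRoot_eq_self p hw (pvRoot_mem p hw hx) (pvRoot_fixed p hw hx)

theorem pvRoot_fix_of_eq (p : PySem.Dict String String) (hw : pvWf p) {x : String}
    (hx : x ∈ p.keys) (h : pvRoot p x = x) : p.getD x x = x := by
  by_contra hne
  obtain ⟨hy, hyx⟩ := hw.2 x hx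
  have hylt : p.getD x x < x := lt_of_le_of_ne hyx hne
  have h2 : pvRoot p x = pvRoot p (p.getD x x) := by
    rw [pvRoot_unfold p hw hx, if_neg hne]
  have h3 : pvRoot p (p.getD x x) ≤ p.getD x x := pvRoot_le p hw hy
  rw [h] at h2
  have h4 : x ≤ p.getD x x := le_trans (le_of_eq h2) h3
  exact absurd (lt_of_le_of_lt h4 hylt) (lt_irrefl x)

theorem pvKeys_insert_mem (p : PySem.Dict String String) {u : String} (hu : u ∈ p.keys)
    (w : String) : (p.insert u w).keys = p.keys :=
  PySem.Dict.keys_insert_of_contains _ _ ((PySem.Dict.contains_iff_mem_keys _ _).mpr hu)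

theorem pvGetD_insert (p : PySem.Dict String String) (u w y : String) :
    (p.insert u w).getD y y = if y = u then w else p.getD y y :=
  PySem.Dict.getD_insert _ _ _ _ _

theorem pvWf_insert (p : PySem.Dict String String) (hw : pvWf p) {u w : String}
    (hu : u ∈ p.keys) (hwk : w ∈ p.keys) (hwu : w ≤ u) : pvWf (p.insert u w) := by
  have hkeys := pvKeys_insert_mem p hu w
  refine ⟨hkeys ▸ hw.1, ?_⟩
  intro y hy
  rw [hkeys] at hy
  rw [hkeys, pvGetD_insert]
  by_cases hyu : y = u
  · subst hyu; exact ⟨by rw [if_pos rfl]; exact hwk, by rw [if_pos rfl]; exact hwu⟩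
  · simp only [hyu, if_false]; exact hw.2 y hy

theorem pvRoot_insert_root (p : PySem.Dict String String) (hw : pvWf p) {u : String}
    (hu : u ∈ p.keys) : ∀ y ∈ p.keys, pvRoot (p.insert u (pvRoot p u)) y = pvRoot p y := by
  have hwk : pvRoot p u ∈ p.keys := pvRoot_mem p hw hu
  have hwle : pvRoot p u ≤ u := pvRoot_le p hw hu
  have hq : pvWf (p.insert u (pvRoot p u)) := pvWf_insert p hw hu hwk hwle
  have hkq : (p.insert u (pvRoot p u)).keys = p.keys := pvKeys_insert_mem p hu _
  suffices H : ∀ n, ∀ y ∈ p.keys, pvM p.keys y < n →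
      pvRoot (p.insert u (pvRoot p u)) y = pvRoot p y by
    intro y hy; exact H (pvM p.keys y + 1) y hy (Nat.lt_succ_self _)
  intro n
  induction n with
  | zero => intro y _ hm; omega
  | succ n ih =>
    intro y hy hm
    have hyq : y ∈ (p.insert u (pvRoot p u)).keys := hkq ▸ hy
    have hgd : (p.insert u (pvRoot p u)).getD y y =
        if y = u then pvRoot p u else p.getD y y := pvGetD_insert p u _ y
    by_cases hyu : y = u
    · subst hyu
      by_cases hru : pvRoot p y = y
      · have hst : (p.insert y (pvRoot p y)).getD y y = y := by rw [hgd]; simp [hru]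
        rw [pvRoot_eq_self _ hq hyq hst, hru]
      · have hwlt : pvRoot p y < y := lt_of_le_of_ne hwle hru
        have hst : (p.insert y (pvRoot p y)).getD y y = pvRoot p y := by rw [hgd]; simp
        have hmw : pvM p.keys (pvRoot p y) < n := by
          have := pvM_lt_pvM hwk hwlt; omega
        rw [pvRoot_unfold _ hq hyq, hst, if_neg hru, ih _ hwk hmw]
        exact pvRoot_root p hw hy
    · have hst : (p.insert u (pvRoot p u)).getD y y = p.getD y y := by rw [hgd, if_neg hyu]
      by_cases hpy : p.getD y y = y
      · rw [pvRoot_eq_self _ hq hyq (hst.trans hpy), pvRoot_eq_self p hw hy hpy]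
      · obtain ⟨hmem, hle⟩ := hw.2 y hy
        have hlt := lt_of_le_of_ne hle hpy
        have hmy : pvM p.keys (p.getD y y) < n := by have := pvM_lt_pvM hmem hlt; omega
        rw [pvRoot_unfold _ hq hyq, hst, if_neg hpy, ih _ hmem hmy,
          pvRoot_unfold p hw hy, if_neg hpy]

theorem pvRoot_insert_link (p : PySem.Dict String String) (hw : pvWf p) {lo hi : String}
    (hlo : lo ∈ p.keys) (hhi : hi ∈ p.keys) (hlh : lo < hi)
    (hflo : p.getD lo lo = lo) (hfhi : p.getD hi hi = hi) :
    ∀ y ∈ p.keys, pvRoot (p.insert hi lo) y =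
      if pvRoot p y = hi then lo else pvRoot p y := by
  have hq : pvWf (p.insert hi lo) := pvWf_insert p hw hhi hlo (le_of_lt hlh)
  have hkq : (p.insert hi lo).keys = p.keys := pvKeys_insert_mem p hhi _
  have hrlo : pvRoot p lo = lo := pvRoot_eq_self p hw hlo hflo
  have hrhi : pvRoot p hi = hi := pvRoot_eq_self p hw hhi hfhi
  suffices H : ∀ n, ∀ y ∈ p.keys, pvM p.keys y < n →
      pvRoot (p.insert hi lo) y = if pvRoot p y = hi then lo else pvRoot p y by
    intro y hy; exact H (pvM p.keys y + 1) y hy (Nat.lt_succ_self _)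
  intro n
  induction n with
  | zero => intro y _ hm; omega
  | succ n ih =>
    intro y hy hm
    have hyq : y ∈ (p.insert hi lo).keys := hkq ▸ hy
    have hgd : (p.insert hi lo).getD y y = if y = hi then lo else p.getD y y :=
      pvGetD_insert p hi lo y
    by_cases hyhi : y = hi
    · subst hyhi
      have hst : (p.insert y lo).getD y y = lo := by rw [hgd]; simp
      have hmlo : pvM p.keys lo < n := by
        have := pvM_lt_pvM hlo hlh; omega
      rw [pvRoot_unfold _ hq hyq, hst, if_neg (ne_of_lt hlh), ih lo hlo hmlo, hrlo,
        if_neg (ne_of_lt hlh), hrhi, if_pos rfl]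
    · have hst : (p.insert hi lo).getD y y = p.getD y y := by rw [hgd, if_neg hyhi]
      by_cases hpy : p.getD y y = y
      · have h1 := pvRoot_eq_self _ hq hyq (hst.trans hpy)
        have h2 := pvRoot_eq_self p hw hy hpy
        rw [h1, h2, if_neg hyhi]
      · obtain ⟨hmem, hle⟩ := hw.2 y hy
        have hlt := lt_of_le_of_ne hle hpy
        have hmy : pvM p.keys (p.getD y y) < n := by have := pvM_lt_pvM hmem hlt; omega
        rw [pvRoot_unfold _ hq hyq, hst, if_neg hpy, ih _ hmem hmy,
          pvRoot_step p hw hy]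

theorem pvCompress_spec :
    ∀ (f : Nat) (p : PySem.Dict String String) (x r : String), pvWf p → x ∈ p.keys →
      r = pvRoot p x →
      (pvCompress f p x r).keys = p.keys ∧ pvWf (pvCompress f p x r) ∧
        ∀ y ∈ p.keys, pvRoot (pvCompress f p x r) y = pvRoot p y := by
  intro f
  induction f with
  | zero => intro p x r hw _ _; exact ⟨rfl, hw, fun y _ => rfl⟩
  | succ f ih =>
    intro p x r hw hx hr
    rw [pvCompress_succ]
    by_cases h : p.getD x x = r
    · rw [if_neg (not_not_intro h)]
      exact ⟨rfl, hw, fun y _ => rfl⟩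
    · simp only [ne_eq, h, not_false_eq_true, if_true]
      subst hr
      have hwk : pvRoot p x ∈ p.keys := pvRoot_mem p hw hx
      have hwle : pvRoot p x ≤ x := pvRoot_le p hw hx
      have hq : pvWf (p.insert x (pvRoot p x)) := pvWf_insert p hw hx hwk hwle
      have hkq : (p.insert x (pvRoot p x)).keys = p.keys := pvKeys_insert_mem p hx _
      have hroots := pvRoot_insert_root p hw hx
      obtain ⟨hx', _⟩ := hw.2 x hx
      have hx'q : p.getD x x ∈ (p.insert x (pvRoot p x)).keys := hkq ▸ hx'
      have hr' : pvRoot p x = pvRoot (p.insert x (pvRoot p x)) (p.getD x x) := by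
        rw [hroots _ hx', pvRoot_step p hw hx]
      obtain ⟨hk2, hw2, hroots2⟩ := ih (p.insert x (pvRoot p x)) (p.getD x x) (pvRoot p x) hq hx'q hr'
      refine ⟨hk2.trans hkq, hw2, fun y hy => ?_⟩
      rw [hroots2 y (hkq ▸ hy), hroots y hy]

theorem pvFind_spec (F : Nat) (p : PySem.Dict String String) (x : String) (hw : pvWf p)
    (hx : x ∈ p.keys) (hm : pvM p.keys x < F) :
    (pvFind F p x).2 = pvRoot p x ∧ (pvFind F p x).1.keys = p.keys ∧ pvWf (pvFind F p x).1 ∧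
      ∀ y ∈ p.keys, pvRoot (pvFind F p x).1 y = pvRoot p y := by
  have hr : pvFindRoot F p x = pvRoot p x := pvRoot_eq_findRoot p hw hx hm
  have hfst : (pvFind F p x).1 = pvCompress F p x (pvFindRoot F p x) := rfl
  have hsnd : (pvFind F p x).2 = pvFindRoot F p x := rfl
  obtain ⟨h1, h2, h3⟩ := pvCompress_spec F p x (pvFindRoot F p x) hw hx hr
  rw [hfst, hsnd]
  exact ⟨hr, h1, h2, h3⟩

theorem pvRelabelAux_get? (hi lo : String) :
    ∀ (l : List (String × String)) (k : String),
      (PySem.Dict.mk (l.map (fun kv => (kv.1, if kv.2 = hi then lo else kv.2)))).get? k =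
        ((PySem.Dict.mk l).get? k).map (fun r => if r = hi then lo else r) := by
  intro l
  induction l with
  | nil => intro k; rfl
  | cons kv t ih =>
    obtain ⟨k1, v1⟩ := kv
    intro k
    simp only [List.map_cons, PySem.Dict.get?_mk_cons]
    by_cases h : (k1 == k) = true
    · simp [h]
    · simp [h, ih k]

theorem pvRelabel_get? (hi lo : String) (d : PySem.Dict String String) (k : String) :
    (pvRelabel hi lo d).get? k = (d.get? k).map (fun r => if r = hi then lo else r) :=
  pvRelabelAux_get? hi lo d.items k

theorem pvRelabel_keys (hi lo : String) (d : PySem.Dict String String) :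
    (pvRelabel hi lo d).keys = d.keys := by
  simp [pvRelabel, PySem.Dict.keys, List.map_map, Function.comp]

theorem pvGetD_of_mem (d : PySem.Dict String String) {k : String} (hk : k ∈ d.keys) (a b : String) :
    d.getD k a = d.getD k b := by
  rcases hv : d.get? k with _ | v
  · exact absurd ((PySem.Dict.get?_eq_none_iff_not_mem_keys _ _).mp hv) (not_not_intro hk)
  · rw [PySem.Dict.getD_of_get?_eq_some _ _ hv, PySem.Dict.getD_of_get?_eq_some _ _ hv]

theorem pvRelabel_getD (hi lo : String) (d : PySem.Dict String String) {k : String}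
    (hk : k ∈ d.keys) : (pvRelabel hi lo d).getD k k =
      if d.getD k k = hi then lo else d.getD k k := by
  rcases hv : d.get? k with _ | v
  · exact absurd ((PySem.Dict.get?_eq_none_iff_not_mem_keys _ _).mp hv) (not_not_intro hk)
  · have h1 : (pvRelabel hi lo d).get? k = some (if v = hi then lo else v) := by
      rw [pvRelabel_get? hi lo d k, hv]; rfl
    rw [PySem.Dict.getD_of_get?_eq_some _ _ h1, PySem.Dict.getD_of_get?_eq_some _ _ hv]

theorem pvInit_get? : ∀ (l : List String) (d : PySem.Dict String String) (x : String),
    (l.foldl (fun d e => d.insert e e) d).get? x = if x ∈ l then some x else d.get? x := by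
  intro l
  induction l with
  | nil => intro d x; simp
  | cons h t ih =>
    intro d x
    rw [List.foldl_cons, ih]
    by_cases hxt : x ∈ t
    · simp [hxt]
    · by_cases hxh : x = h
      · simp [hxh]
      · simp [hxt, hxh, PySem.Dict.get?_insert]

theorem pvInit_inv (elements : List String) :
    pvInv elements (elements.foldl (fun d e => d.insert e e) PySem.Dict.empty)
      (elements.foldl (fun d e => d.insert e e) PySem.Dict.empty) := by
  have hkeys : (elements.foldl (fun d e => d.insert e e) PySem.Dict.empty).keys =
      PySem.Set.ofList elements := by
    have h := PySem.Dict.keys_foldl_insert (ν := String) elements (fun _ e => e) PySem.Dict.empty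
    simpa using h
  have hnd : (elements.foldl (fun d e => d.insert e e) PySem.Dict.empty).keys.Nodup :=
    PySem.Dict.nodup_keys_foldl_insert elements (fun _ e => e) PySem.Dict.empty
      (by simp [PySem.Dict.keys_empty])
  have hgd : ∀ x ∈ (elements.foldl (fun d e => d.insert e e) PySem.Dict.empty).keys,
      (elements.foldl (fun d e => d.insert e e) PySem.Dict.empty).getD x x = x := by
    intro x hx
    rw [hkeys] at hx
    have hxe : x ∈ elements := (PySem.Set.mem_ofList _ _).mp hx
    have h := pvInit_get? elements PySem.Dict.empty x
    rw [if_pos hxe] at h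
    exact PySem.Dict.getD_of_get?_eq_some _ _ h
  have hwf : pvWf (elements.foldl (fun d e => d.insert e e) PySem.Dict.empty) := by
    refine ⟨hnd, fun x hx => ?_⟩
    rw [hgd x hx]
    exact ⟨hx, le_refl x⟩
  exact ⟨hkeys, rfl, hwf, fun x hx => (hgd x hx).trans (pvRoot_eq_self _ hwf hx (hgd x hx)).symm⟩

theorem pvUnion_step (elements : List String) (p d : PySem.Dict String String)
    (ab : String × String) (hinv : pvInv elements p d)
    (ha : ab.1 ∈ elements) (hb : ab.2 ∈ elements) :
    pvInv elements (pvUnion (elements.length + 1) p ab.1 ab.2) (pvStepB d ab) := by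
  obtain ⟨hkp, hkd, hw, hval⟩ := hinv
  have hak : ab.1 ∈ p.keys := by rw [hkp]; exact (PySem.Set.mem_ofList _ _).mpr ha
  have hbk : ab.2 ∈ p.keys := by rw [hkp]; exact (PySem.Set.mem_ofList _ _).mpr hb
  have hlen : p.keys.length ≤ elements.length := by
    rw [hkp]; exact PySem.Set.length_ofList_le _
  have hma : pvM p.keys ab.1 < elements.length + 1 := by have := pvM_le p.keys ab.1; omega
  obtain ⟨hra, hk1, hw1, hroots1⟩ := pvFind_spec (elements.length + 1) p ab.1 hw hak hma
  have hbk1 : ab.2 ∈ (pvFind (elements.length + 1) p ab.1).1.keys := by rw [hk1]; exact hbk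
  have hmb : pvM (pvFind (elements.length + 1) p ab.1).1.keys ab.2 < elements.length + 1 := by
    rw [hk1]
    have := pvM_le p.keys ab.2
    omega
  obtain ⟨hrb, hk2, hw2, hroots2⟩ :=
    pvFind_spec (elements.length + 1) (pvFind (elements.length + 1) p ab.1).1 ab.2 hw1 hbk1 hmb
  have hrb' : (pvFind (elements.length + 1) (pvFind (elements.length + 1) p ab.1).1 ab.2).2 =
      pvRoot p ab.2 := by rw [hrb, hroots1 ab.2 hbk]
  have hk12 : (pvFind (elements.length + 1) (pvFind (elements.length + 1) p ab.1).1 ab.2).1.keys =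
      p.keys := by rw [hk2, hk1]
  have hroots12 : ∀ y ∈ p.keys,
      pvRoot (pvFind (elements.length + 1) (pvFind (elements.length + 1) p ab.1).1 ab.2).1 y =
        pvRoot p y := fun y hy => by
    rw [hroots2 y (by rw [hk1]; exact hy), hroots1 y hy]
  have hda : d.getD ab.1 ab.1 = pvRoot p ab.1 := hval ab.1 hak
  have hdb : d.getD ab.2 ab.2 = pvRoot p ab.2 := hval ab.2 hbk
  simp only [pvUnion, pvStepB]
  rw [hra, hrb', hda, hdb]
  by_cases heq : pvRoot p ab.1 = pvRoot p ab.2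
  · rw [if_pos heq, if_neg (not_not_intro heq)]
    refine ⟨hk12.trans hkp, hkd.trans hk12.symm, hw2, fun x hx => ?_⟩
    rw [hk12] at hx
    rw [hval x hx, hroots12 x hx]
  · rw [if_neg heq, if_pos heq]
    have hRa2 : pvRoot p ab.1 ∈
        (pvFind (elements.length + 1) (pvFind (elements.length + 1) p ab.1).1 ab.2).1.keys := by
      rw [hk12]; exact pvRoot_mem p hw hak
    have hRb2 : pvRoot p ab.2 ∈
        (pvFind (elements.length + 1) (pvFind (elements.length + 1) p ab.1).1 ab.2).1.keys := by
      rw [hk12]; exact pvRoot_mem p hw hbk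
    have hfixa : (pvFind (elements.length + 1) (pvFind (elements.length + 1) p ab.1).1 ab.2).1.getD
        (pvRoot p ab.1) (pvRoot p ab.1) = pvRoot p ab.1 :=
      pvRoot_fix_of_eq _ hw2 hRa2
        (by rw [hroots12 _ (pvRoot_mem p hw hak)]; exact pvRoot_root p hw hak)
    have hfixb : (pvFind (elements.length + 1) (pvFind (elements.length + 1) p ab.1).1 ab.2).1.getD
        (pvRoot p ab.2) (pvRoot p ab.2) = pvRoot p ab.2 :=
      pvRoot_fix_of_eq _ hw2 hRb2
        (by rw [hroots12 _ (pvRoot_mem p hw hbk)]; exact pvRoot_root p hw hbk)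
    by_cases hlt : pvRoot p ab.1 < pvRoot p ab.2
    · rw [if_pos hlt, if_pos hlt, if_pos hlt]
      have hlink := pvRoot_insert_link _ hw2 hRa2 hRb2 hlt hfixa hfixb
      have hkq := pvKeys_insert_mem _ hRb2 (pvRoot p ab.1)
      refine ⟨hkq.trans (hk12.trans hkp), ?_, pvWf_insert _ hw2 hRb2 hRa2 (le_of_lt hlt),
        fun x hx => ?_⟩
      · rw [pvRelabel_keys, hkq, hkd, hk12]
      · rw [hkq, hk12] at hx
        have hxd : x ∈ d.keys := by rw [hkd]; exact hx
        rw [pvRelabel_getD _ _ d hxd, hval x hx,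
          hlink x (by rw [hk12]; exact hx), hroots12 x hx]
    · have hgt : pvRoot p ab.2 < pvRoot p ab.1 := (lt_or_gt_of_ne heq).resolve_left hlt
      rw [if_neg hlt, if_neg hlt, if_neg hlt]
      have hlink := pvRoot_insert_link _ hw2 hRb2 hRa2 hgt hfixb hfixa
      have hkq := pvKeys_insert_mem _ hRa2 (pvRoot p ab.2)
      refine ⟨hkq.trans (hk12.trans hkp), ?_, pvWf_insert _ hw2 hRa2 hRb2 (le_of_lt hgt),
        fun x hx => ?_⟩
      · rw [pvRelabel_keys, hkq, hkd, hk12]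
      · rw [hkq, hk12] at hx
        have hxd : x ∈ d.keys := by rw [hkd]; exact hx
        rw [pvRelabel_getD _ _ d hxd, hval x hx,
          hlink x (by rw [hk12]; exact hx), hroots12 x hx]

theorem pvEdges_fold (elements : List String) :
    ∀ (es : List (String × String)) (p d : PySem.Dict String String), pvInv elements p d →
      (∀ ab ∈ es, ab.1 ∈ elements ∧ ab.2 ∈ elements) →
      pvInv elements (es.foldl (fun p ab => pvUnion (elements.length + 1) p ab.1 ab.2) p)
        (es.foldl pvStepB d) := by
  intro es
  induction es with
  | nil => intro p d hinv _; exact hinv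
  | cons ab t ih =>
    intro p d hinv hpre
    rw [List.foldl_cons, List.foldl_cons]
    exact ih _ _ (pvUnion_step elements p d ab hinv (hpre ab List.mem_cons_self).1
      (hpre ab List.mem_cons_self).2) (fun e he => hpre e (List.mem_cons_of_mem ab he))

theorem pvFinal_fold (F : Nat) (K : List String) (ρ : String → String) :
    ∀ (ks : List String) (p : PySem.Dict String String) (acc : List (String × String)),
      (∀ y ∈ ks, y ∈ K) → p.keys = K → pvWf p → (∀ y ∈ K, pvRoot p y = ρ y) →
      K.length < F →
      (ks.foldl (fun st x =>
          let fr := pvFind F st.1 x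
          (fr.1, st.2 ++ [(x, fr.2)])) (p, acc)).2 = acc ++ ks.map (fun x => (x, ρ x)) := by
  intro ks
  induction ks with
  | nil => intro p acc _ _ _ _ _; simp
  | cons x t ih =>
    intro p acc hsub hkp hw hρ hF
    have hxK : x ∈ K := hsub x List.mem_cons_self
    have hxk : x ∈ p.keys := by rw [hkp]; exact hxK
    have hm : pvM p.keys x < F := by
      have h1 := pvM_le p.keys x
      have h2 : p.keys.length = K.length := by rw [hkp]
      omega
    obtain ⟨hr, hk1, hw1, hroots1⟩ := pvFind_spec F p x hw hxk hm
    rw [List.foldl_cons]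
    have step : ((let fr := pvFind F (p, acc).1 x; (fr.1, (p, acc).2 ++ [(x, fr.2)])) :
        PySem.Dict String String × List (String × String)) =
        ((pvFind F p x).1, acc ++ [(x, pvRoot p x)]) := by
      simp only [hr]
    rw [step, ih (pvFind F p x).1 (acc ++ [(x, pvRoot p x)])
      (fun y hy => hsub y (List.mem_cons_of_mem x hy)) (hk1.trans hkp) hw1
      (fun y hy => by rw [hroots1 y (by rw [hkp]; exact hy)]; exact hρ y hy) hF]
    rw [hρ x hxK]
    simp [List.append_assoc]

-- ===== VERDICT (by name: the statement is the Claim_ definition above) =====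
set_option maxHeartbeats 1000000 in
theorem kernel_projection_py_spec : Claim_equal_kernel_projection_py := by
  intro elements edges hdom hpre
  unfold Spec_kernel_projection_py
  simp only [kernel_projection_py, kernel_projection_py_alt]
  obtain ⟨hkp, hkd, hw, hval⟩ := pvEdges_fold elements edges _ _ (pvInit_inv elements) hpre
  set P := edges.foldl (fun p ab => pvUnion (elements.length + 1) p ab.1 ab.2)
    (elements.foldl (fun d e => d.insert e e) PySem.Dict.empty) with hP
  set D := edges.foldl pvStepB
    (elements.foldl (fun d e => d.insert e e) PySem.Dict.empty) with hD
  have hKlen : P.keys.length < elements.length + 1 := by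
    rw [hkp]
    have := PySem.Set.length_ofList_le elements
    omega
  rw [pvFinal_fold (elements.length + 1) P.keys (pvRoot P) P.keys P []
    (fun y hy => hy) rfl hw (fun y _ => rfl) hKlen]
  have hnd : D.keys.Nodup := by rw [hkd]; exact hw.1
  rw [PySem.Dict.items_eq_map_keys _ hnd "", hkd, List.nil_append]
  apply List.map_congr_left
  intro k hk
  have hkd' : k ∈ D.keys := by rw [hkd]; exact hk
  rw [pvGetD_of_mem _ hkd' "" k, hval k hk]
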